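-- pv_equiv track=rewrite | github.com/emms204/ScriptGen | src/TextGen/ScriptGen/generators/script_generator.py | _parse_screenplay_format
-- ===== SOURCE A (Python) =====
-- from typing import Dict, List, Any, Optional, Tuple, Union
--
-- def _parse_screenplay_format(text: str) -> Dict[str, Any]:
--     """
--     Parse screenplay format text.
--
--     Args:
--         text: The screenplay text
--
--     Returns:
--         Structured dialogue
--     """
--     lines = []
--     current_speaker = None
--     current_dialogue = []
--
--     for line in text.split("\n"):
--         line = line.strip()
--         if not line:
--             continue
--
--         # Check if this line is a character name (usually in all caps)
--         if line.isupper() and len(line) < 30: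
--             # Save previous speaker's dialogue
--             if current_speaker and current_dialogue:
--                 lines.append({
--                     "speaker": current_speaker,
--                     "text": " ".join(current_dialogue)
--                 })
--
--             # Start new speaker
--             current_speaker = line
--             current_dialogue = []
--         elif current_speaker and not line.startswith("(") and not line.upper().startswith("INT.") and not line.upper().startswith("EXT."):
--             # This is dialogue for the current speaker
--             current_dialogue.append(line)
--
--     # Add the last speaker
--     if current_speaker and current_dialogue:
--         lines.append({
--             "speaker": current_speaker,
--             "text": " ".join(current_dialogue)
--         })
--
--     return {"lines": lines}
-- ===== SOURCE B (Python) =====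
-- def _parse_screenplay_format(text):
--     """Two-pass parse: group stripped non-empty lines into (speaker, body) blocks, then filter/join each block."""
--     nonempty = [s for s in (l.strip() for l in text.split("\n")) if s]
--
--     def is_header(l):
--         return l.isupper() and len(l) < 30
--
--     def blocks(ls):
--         out = []
--         i = 0
--         n = len(ls)
--         while i < n:
--             if is_header(ls[i]):
--                 j = i + 1
--                 while j < n and not is_header(ls[j]):
--                     j += 1
--                 out.append((ls[i], ls[i + 1:j]))
--                 i = j
--             else:
--                 i += 1
--         return out
--
--     result = []
--     for speaker, body in blocks(nonempty):
--         kept = [l for l in body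
--                 if not l.startswith("(")
--                 and not l.upper().startswith(("INT.", "EXT."))]
--         if kept:
--             result.append({"speaker": speaker, "text": " ".join(kept)})
--     return {"lines": result}
-- ===== Notes on version B (the rewrite author's own statement) =====
-- stated objective: alternative
-- what changed: Replaces A's single fold over mutable speaker/current-dialogue state with a two-pass pipeline: first group stripped non-empty lines into (speaker, raw-body) blocks, then filter each block's dialogue lines and join.
import Mathlib
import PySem

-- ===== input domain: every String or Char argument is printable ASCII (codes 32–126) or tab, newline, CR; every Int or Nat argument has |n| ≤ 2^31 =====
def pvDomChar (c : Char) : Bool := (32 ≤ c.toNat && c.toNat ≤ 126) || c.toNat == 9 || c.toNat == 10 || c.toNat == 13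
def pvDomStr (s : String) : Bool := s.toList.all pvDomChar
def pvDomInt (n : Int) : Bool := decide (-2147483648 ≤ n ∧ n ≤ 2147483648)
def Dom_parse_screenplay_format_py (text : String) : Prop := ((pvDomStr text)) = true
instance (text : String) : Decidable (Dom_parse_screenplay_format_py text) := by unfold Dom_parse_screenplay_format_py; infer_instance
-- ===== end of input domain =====

-- B re-parses in two passes (group lines into speaker blocks, then filter/join each block) instead of A's
-- single fold over mutable speaker/dialogue state; objective: alternative decomposition, same cost.

-- ===== PORT A =====
-- shared per-line predicates (both Pythons apply the identical per-line tests)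
-- str.isupper(): hand port (no string-level isupper in PySem) — exact on ASCII: no lowercase
-- cased char and at least one cased char (on ASCII the cased chars are exactly the letters)
def pyStrIsupper (l : List Char) : Bool :=
  l.any PySem.Chars.isupper && l.all (fun c => !PySem.Chars.islower c)

def pvIsHdr (l : List Char) : Bool := pyStrIsupper l && decide (l.length < 30)

def pvKeep (l : List Char) : Bool :=
  !(PySem.Chars.startswith l ['(']) &&
  !(PySem.Chars.startswith (PySem.Chars.upper l) "INT.".toList) &&
  !(PySem.Chars.startswith (PySem.Chars.upper l) "EXT.".toList)

def pvEntry (sp : List Char) (dia : List (List Char)) : List (String × String) :=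
  [("speaker", String.ofList sp), ("text", String.ofList (PySem.Chars.join [' '] dia))]

-- A's loop body on an already-stripped non-empty line, over state (lines, current_speaker, current_dialogue)
def aCore : (List (List (String × String)) × Option (List Char) × List (List Char)) → List Char →
    (List (List (String × String)) × Option (List Char) × List (List Char))
  | (acc, some sp, dia), l =>
    if pvIsHdr l then
      (if dia = [] then acc else acc ++ [pvEntry sp dia], some l, [])
    else if pvKeep l then (acc, some sp, dia ++ [l]) else (acc, some sp, dia)
  | (acc, none, dia), l =>
    if pvIsHdr l then (acc, some l, []) else (acc, none, dia)

-- A's loop body on a raw line: strip, skip if empty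
def aStep (st : List (List (String × String)) × Option (List Char) × List (List Char))
    (raw : List Char) : List (List (String × String)) × Option (List Char) × List (List Char) :=
  let l := PySem.Chars.strip raw
  if l = [] then st else aCore st l

-- the trailing 'if current_speaker and current_dialogue' flush
def aFinish : (List (List (String × String)) × Option (List Char) × List (List Char)) →
    List (List (String × String))
  | (acc, some sp, dia) => if dia = [] then acc else acc ++ [pvEntry sp dia]
  | (acc, none, _) => acc

def parse_screenplay_format_py (text : String) : List (String × List (List (String × String))) :=
  [("lines", aFinish ((PySem.Chars.splitOn text.toList ['\n']).foldl aStep ([], none, [])))]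

-- ===== PORT B =====
def bNonempty (text : String) : List (List Char) :=
  ((PySem.Chars.splitOn text.toList ['\n']).map PySem.Chars.strip).filter (fun l => !l.isEmpty)

-- first pass: (speaker, raw body) blocks; body = lines up to the next header, resume there
def bBlocks : List (List Char) → List ((List Char) × List (List Char))
  | [] => []
  | h :: t =>
    if pvIsHdr h then
      (h, t.takeWhile (fun l => !pvIsHdr l)) :: bBlocks (t.dropWhile (fun l => !pvIsHdr l))
    else bBlocks t
  termination_by ls => ls.length
  decreasing_by
    · exact Nat.lt_succ_of_le (List.length_dropWhile_le _ _)
    · exact Nat.lt_succ_self _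

-- second pass: keep dialogue lines, drop blocks with none
def bOut (bs : List ((List Char) × List (List Char))) : List (List (String × String)) :=
  bs.filterMap (fun b =>
    let kept := b.2.filter pvKeep
    if kept = [] then none else some (pvEntry b.1 kept))

def parse_screenplay_format_py_alt (text : String) : List (String × List (List (String × String))) :=
  [("lines", bOut (bBlocks (bNonempty text)))]

-- ===== PRECONDITION & SPEC =====
def Spec_parse_screenplay_format_py (text : String) (out : List (String × List (List (String × String)))) : Prop := out = parse_screenplay_format_py_alt text
instance (text : String) (out : List (String × List (List (String × String)))) : Decidable (Spec_parse_screenplay_format_py text out) := by unfold Spec_parse_screenplay_format_py; infer_instance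

-- ===== CLAIM (what is proved, stated in full; the proofs are below) =====
def Claim_equal_parse_screenplay_format_py : Prop := ∀ (text : String), Dom_parse_screenplay_format_py text → Spec_parse_screenplay_format_py text (parse_screenplay_format_py text)

-- ===== LEMMAS AND PROOFS =====

-- fold of aStep over raw lines = fold of aCore over stripped non-empty lines
theorem foldl_aStep_eq (ls : List (List Char)) (st : List (List (String × String)) × Option (List Char) × List (List Char)) :
    ls.foldl aStep st = ((ls.map PySem.Chars.strip).filter (fun l => !l.isEmpty)).foldl aCore st := by
  induction ls generalizing st with
  | nil => rfl
  | cons l ls ih =>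
    simp only [List.map_cons, List.filter_cons]
    by_cases h : PySem.Chars.strip l = []
    · simp [aStep, h, ih]
    · simp [aStep, h, ih]

-- main invariant: with a speaker active and filtered dialogue dia accumulated, running A's core loop
-- and flushing equals emitting the current block (body = takeWhile non-header) then B's remaining blocks
theorem main_inv (ls : List (List Char)) (sp : List Char) (dia : List (List Char))
    (acc : List (List (String × String))) :
    aFinish (ls.foldl aCore (acc, some sp, dia)) =
      acc ++ (let kept := dia ++ (ls.takeWhile (fun l => !pvIsHdr l)).filter pvKeep
        (if kept = [] then [] else [pvEntry sp kept]) ++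
          bOut (bBlocks (ls.dropWhile (fun l => !pvIsHdr l)))) := by
  induction ls generalizing sp dia acc with
  | nil =>
    simp only [List.foldl_nil, aFinish, List.takeWhile_nil, List.dropWhile_nil, List.filter_nil,
      List.append_nil, bBlocks, bOut, List.filterMap_nil]
    split_ifs <;> simp
  | cons l ls ih =>
    by_cases hh : pvIsHdr l = true
    · simp only [List.foldl_cons, aCore, hh, if_pos]
      rw [ih]
      have ht : (l :: ls).takeWhile (fun l => !pvIsHdr l) = [] := by simp [hh]
      have hd : (l :: ls).dropWhile (fun l => !pvIsHdr l) = l :: ls := by simp [hh]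
      rw [ht, hd]
      simp only [bBlocks, hh, if_pos, bOut, List.filterMap_cons]
      by_cases hdia : dia = [] <;>
        by_cases hk : (ls.takeWhile (fun l => !pvIsHdr l)).filter pvKeep = [] <;>
          simp [hdia, hk, List.append_assoc]
    · have hts : (l :: ls).takeWhile (fun l => !pvIsHdr l) = l :: ls.takeWhile (fun l => !pvIsHdr l) := by
        simp [hh]
      have hds : (l :: ls).dropWhile (fun l => !pvIsHdr l) = ls.dropWhile (fun l => !pvIsHdr l) := by
        simp [hh]
      by_cases hk : pvKeep l = true
      · simp only [List.foldl_cons, aCore, hh, if_neg, Bool.false_eq_true, not_false_iff, hk, if_pos]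
        rw [ih, hts, hds]
        simp [hk, List.append_assoc]
      · simp only [List.foldl_cons, aCore, hh, Bool.false_eq_true, if_neg, not_false_iff, hk]
        rw [ih, hts, hds]
        simp [hk]

-- before the first header A's state is inert; the whole run equals B's blocks pipeline
theorem pre_inv (ls : List (List Char)) (acc : List (List (String × String)))
    (dia : List (List Char)) :
    aFinish (ls.foldl aCore (acc, none, dia)) = acc ++ bOut (bBlocks ls) := by
  induction ls generalizing acc dia with
  | nil => simp [aFinish, bBlocks, bOut]
  | cons l ls ih =>
    by_cases hh : pvIsHdr l = true
    · simp only [List.foldl_cons, aCore, hh, if_pos]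
      rw [main_inv]
      simp [bBlocks, hh, bOut, List.filterMap_cons]
      split_ifs <;> simp_all
    · simp only [List.foldl_cons, aCore, hh, Bool.false_eq_true, if_neg, not_false_iff]
      rw [ih, bBlocks]
      simp [hh]

-- ===== VERDICT (by name: the statement is the Claim_ definition above) =====
theorem parse_screenplay_format_py_spec : Claim_equal_parse_screenplay_format_py := by
  intro text _
  unfold Spec_parse_screenplay_format_py parse_screenplay_format_py parse_screenplay_format_py_alt
  rw [foldl_aStep_eq]
  rw [show ((PySem.Chars.splitOn text.toList ['\n']).map PySem.Chars.strip).filter (fun l => !l.isEmpty) = bNonempty text from rfl]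
  rw [pre_inv]
  simp
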